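-- pv_equiv track=rewrite | github.com/in-ci/clash_rules_merged | clash_rules_merged.py | group_sort_stable
-- ===== SOURCE A (Python) =====
-- import string
--
-- def get_key_char(line: str):
--     """
--     获取规则首字母（真正的域名首字母，而不是前面的 "- +."）
--     例如：
--       - +.0.myikas.com → '0'
--       - +.abc.com      → 'a'
--     """
--     s = line.lstrip("- +.")  # 去掉 "- +." 前缀
--     if not s:
--         return "~"  # 末尾处理
--     return s[0].lower()
--
-- def group_sort_stable(lines):
--     """
--     按首字符分组排序：
--     1. 0–9
--     2. a–z
--     3. 其它字符最后
--     组内保持原来顺序（稳定）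
--     """
--
--     groups = {
--         "digit": [],  # 0-9
--         "alpha": [],  # a-z
--         "other": [],  # 其它
--     }
--
--     for line in lines:
--         key = get_key_char(line)
--
--         if key in "0123456789":
--             groups["digit"].append(line)
--         elif key in string.ascii_lowercase:
--             groups["alpha"].append(line)
--         else:
--             groups["other"].append(line)
--
--     # 合并：数字 → 字母 → 其它
--     return groups["digit"] + groups["alpha"] + groups["other"]
-- ===== SOURCE B (Python) =====
-- import string
--
-- def get_key_char(line: str):
--     s = line.lstrip("- +.")
--     if not s:
--         return "~"
--     return s[0].lower()
--
-- def _rank(line):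
--     k = get_key_char(line)
--     if k in "0123456789":
--         return 0
--     if k in string.ascii_lowercase:
--         return 1
--     return 2
--
-- def group_sort_stable(lines):
--     # one stable sort by bucket rank: digits (0), letters (1), other (2)
--     return sorted(lines, key=_rank)
-- ===== Notes on version B (the rewrite author's own statement) =====
-- stated objective: idiomatic
-- what changed: Replaces the explicit three-bucket dict accumulation loop and concatenation with a single stable sort keyed by a 0/1/2 bucket rank, relying on sort stability for in-bucket order.
import Mathlib
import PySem

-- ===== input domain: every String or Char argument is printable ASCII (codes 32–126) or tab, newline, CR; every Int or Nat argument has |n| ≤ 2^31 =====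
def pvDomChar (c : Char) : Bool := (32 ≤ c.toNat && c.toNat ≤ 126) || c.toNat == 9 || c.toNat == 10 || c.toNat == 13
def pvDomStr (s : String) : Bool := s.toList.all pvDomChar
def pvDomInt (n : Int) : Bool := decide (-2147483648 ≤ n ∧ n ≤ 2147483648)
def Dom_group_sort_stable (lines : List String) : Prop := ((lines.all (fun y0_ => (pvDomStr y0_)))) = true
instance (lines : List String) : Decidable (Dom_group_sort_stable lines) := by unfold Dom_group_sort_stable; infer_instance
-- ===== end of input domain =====

-- B replaces A's explicit three-bucket accumulation loop with one stable sort by a 0/1/2 bucket rank (more idiomatic; not claimed faster).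

-- ===== PORT A =====
-- shared helper (verbatim in both Pythons); lstrip("- +.") ported by hand as dropWhile over that char set — exact
def get_key_char (line : String) : String :=
  let s := line.toList.dropWhile (fun c => c == '-' || c == ' ' || c == '+' || c == '.')
  match s with
  | [] => "~"
  | c :: _ => String.ofList [PySem.Chars.lowerChar c]

-- the body of A's for-loop, named so the proofs can speak about it
def pvStepA (g : List String × List String × List String) (line : String) :
    List String × List String × List String :=
  let key := get_key_char line
  if PySem.Str.isIn key "0123456789" then (g.1 ++ [line], g.2.1, g.2.2)
  else if PySem.Str.isIn key "abcdefghijklmnopqrstuvwxyz" then (g.1, g.2.1 ++ [line], g.2.2)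
  else (g.1, g.2.1, g.2.2 ++ [line])

def group_sort_stable (lines : List String) : List String :=
  let groups := lines.foldl pvStepA ([], [], [])
  groups.1 ++ groups.2.1 ++ groups.2.2

-- ===== PORT B =====
def pvRank (line : String) : Int :=
  let k := get_key_char line
  if PySem.Str.isIn k "0123456789" then 0
  else if PySem.Str.isIn k "abcdefghijklmnopqrstuvwxyz" then 1
  else 2

def group_sort_stable_alt (lines : List String) : List String :=
  PySem.List.sorted lines pvRank false

-- ===== PRECONDITION & SPEC =====
def Spec_group_sort_stable (lines : List String) (out : List String) : Prop := out = group_sort_stable_alt lines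
instance (lines : List String) (out : List String) : Decidable (Spec_group_sort_stable lines out) := by unfold Spec_group_sort_stable; infer_instance

-- ===== CLAIM (what is proved, stated in full; the proofs are below) =====
def Claim_equal_group_sort_stable : Prop := ∀ (lines : List String), Dom_group_sort_stable lines → Spec_group_sort_stable lines (group_sort_stable lines)

-- ===== LEMMAS AND PROOFS =====

theorem pvRank_eq_zero {x : String} (h1 : PySem.Str.isIn (get_key_char x) "0123456789" = true) : pvRank x = 0 := by
  unfold pvRank; rw [if_pos h1]

theorem pvRank_eq_one {x : String} (h1 : PySem.Str.isIn (get_key_char x) "0123456789" = false)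
    (h2 : PySem.Str.isIn (get_key_char x) "abcdefghijklmnopqrstuvwxyz" = true) : pvRank x = 1 := by
  unfold pvRank; rw [if_neg (by simpa using h1), if_pos h2]

theorem pvRank_eq_two {x : String} (h1 : PySem.Str.isIn (get_key_char x) "0123456789" = false)
    (h2 : PySem.Str.isIn (get_key_char x) "abcdefghijklmnopqrstuvwxyz" = false) : pvRank x = 2 := by
  unfold pvRank; rw [if_neg (by simpa using h1), if_neg (by simpa using h2)]

theorem insertBy_skip {α : Type} (before : α → α → Bool) (x : α) (p s : List α)
    (hp : ∀ y ∈ p, before x y = false) :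
    PySem.List.insertBy before x (p ++ s) = p ++ PySem.List.insertBy before x s := by
  induction p with
  | nil => simp
  | cons y t ih =>
      have hy : before x y = false := hp y (by simp)
      simp only [List.cons_append, PySem.List.insertBy, hy]
      simp [ih (fun z hz => hp z (by simp [hz]))]

theorem insertBy_front {α : Type} (before : α → α → Bool) (x : α) (s : List α)
    (hs : ∀ y ∈ s, before x y = true) :
    PySem.List.insertBy before x s = x :: s := by
  cases s with
  | nil => rfl
  | cons y t => simp [PySem.List.insertBy, hs y (by simp)]

-- A's loop characterised: the three buckets are the three rank filters
theorem foldA_eq (xs : List String) : ∀ (d a o : List String),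
    xs.foldl pvStepA (d, a, o)
    = (d ++ xs.filter (fun l => pvRank l == 0),
       a ++ xs.filter (fun l => pvRank l == 1),
       o ++ xs.filter (fun l => pvRank l == 2)) := by
  induction xs with
  | nil => simp
  | cons x t ih =>
      intro d a o
      rw [List.foldl_cons]
      cases h1 : PySem.Str.isIn (get_key_char x) "0123456789" with
      | true =>
          have hr := pvRank_eq_zero h1
          rw [show pvStepA (d, a, o) x = (d ++ [x], a, o) from by
            unfold pvStepA; rw [if_pos h1], ih]
          simp [hr]
      | false =>
          cases h2 : PySem.Str.isIn (get_key_char x) "abcdefghijklmnopqrstuvwxyz" with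
          | true =>
              have hr := pvRank_eq_one h1 h2
              rw [show pvStepA (d, a, o) x = (d, a ++ [x], o) from by
                unfold pvStepA; rw [if_neg (by simpa using h1), if_pos h2], ih]
              simp [hr]
          | false =>
              have hr := pvRank_eq_two h1 h2
              rw [show pvStepA (d, a, o) x = (d, a, o ++ [x]) from by
                unfold pvStepA; rw [if_neg (by simpa using h1), if_neg (by simpa using h2)], ih]
              simp [hr]

-- B's stable insertion sort characterised the same way
theorem foldB_eq (xs : List String) : ∀ (d a o : List String),
    (∀ y ∈ d, pvRank y = 0) → (∀ y ∈ a, pvRank y = 1) → (∀ y ∈ o, pvRank y = 2) →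
    xs.foldl (fun acc x => PySem.List.insertBy (fun u v => decide (pvRank u < pvRank v)) x acc)
      (d ++ a ++ o)
    = (d ++ xs.filter (fun l => pvRank l == 0))
      ++ (a ++ xs.filter (fun l => pvRank l == 1))
      ++ (o ++ xs.filter (fun l => pvRank l == 2)) := by
  induction xs with
  | nil => intro d a o _ _ _; simp
  | cons x t ih =>
      intro d a o hd ha ho
      simp only [List.foldl_cons, List.filter_cons]
      rcases (show pvRank x = 0 ∨ pvRank x = 1 ∨ pvRank x = 2 by
          cases h1 : PySem.Str.isIn (get_key_char x) "0123456789" with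
          | true => exact Or.inl (pvRank_eq_zero h1)
          | false =>
              cases h2 : PySem.Str.isIn (get_key_char x) "abcdefghijklmnopqrstuvwxyz" with
              | true => exact Or.inr (Or.inl (pvRank_eq_one h1 h2))
              | false => exact Or.inr (Or.inr (pvRank_eq_two h1 h2)))
        with hr | hr | hr
      · have hstep : PySem.List.insertBy (fun u v => decide (pvRank u < pvRank v)) x (d ++ a ++ o)
            = (d ++ [x]) ++ a ++ o := by
          rw [List.append_assoc, insertBy_skip _ _ d (a ++ o)
            (by intro y hy; simp [hd y hy, hr]),
            insertBy_front _ _ (a ++ o)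
            (by intro y hy; rcases List.mem_append.1 hy with h | h
                · simp [ha y h, hr]
                · simp [ho y h, hr])]
          simp
        rw [hstep, ih (d ++ [x]) a o
          (by intro y hy; rcases List.mem_append.1 hy with h | h
              · exact hd y h
              · simp at h; simpa [h] using hr) ha ho]
        simp [hr]
      · have hstep : PySem.List.insertBy (fun u v => decide (pvRank u < pvRank v)) x (d ++ a ++ o)
            = d ++ (a ++ [x]) ++ o := by
          rw [List.append_assoc, insertBy_skip _ _ d (a ++ o)
            (by intro y hy; simp [hd y hy, hr]),
            insertBy_skip _ _ a o (by intro y hy; simp [ha y hy, hr]),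
            insertBy_front _ _ o (by intro y hy; simp [ho y hy, hr])]
          simp
        rw [hstep, ih d (a ++ [x]) o hd
          (by intro y hy; rcases List.mem_append.1 hy with h | h
              · exact ha y h
              · simp at h; simpa [h] using hr) ho]
        simp [hr]
      · have hstep : PySem.List.insertBy (fun u v => decide (pvRank u < pvRank v)) x (d ++ a ++ o)
            = d ++ a ++ (o ++ [x]) := by
          rw [List.append_assoc, insertBy_skip _ _ d (a ++ o)
            (by intro y hy; simp [hd y hy, hr]),
            insertBy_skip _ _ a o (by intro y hy; simp [ha y hy, hr]),
            PySem.List.insertBy_of_forall_not_before _ _ o (by intro y hy; simp [ho y hy, hr])]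
          simp
        rw [hstep, ih d a (o ++ [x]) hd ha
          (by intro y hy; rcases List.mem_append.1 hy with h | h
              · exact ho y h
              · simp at h; simpa [h] using hr)]
        simp [hr]

-- ===== VERDICT (by name: the statement is the Claim_ definition above) =====
theorem group_sort_stable_spec : Claim_equal_group_sort_stable := by
  intro lines _
  unfold Spec_group_sort_stable group_sort_stable group_sort_stable_alt
  rw [PySem.List.sorted_eq_foldl_insertBy]
  have hB := foldB_eq lines [] [] [] (by simp) (by simp) (by simp)
  simp only [List.nil_append, List.append_nil] at hB
  rw [hB, foldA_eq]
  simp
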